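-- pv_equiv track=rewrite | github.com/gabriellaec/desoft-analise-exercicios | backup/user_267/ch63_2020_04_27_14_23_06_895427.py | nome_usuario
-- ===== SOURCE A (Python) =====
-- def nome_usuario(digite):
--     a = '@'
--     new = []
--     for i in range(len(digite)):
--         if a == digite[i]:
--             while i > 0:
--                 i -= 1
--                 new.append(digite[i])
--     t = new[::-1]
--     return ''.join(t)
-- ===== SOURCE B (Python) =====
-- def nome_usuario(digite):
--     result = ""
--     for i, c in enumerate(digite):
--         if c == '@':
--             result = digite[:i] + result
--     return result
-- ===== Notes on version B (the rewrite author's own statement) =====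
-- stated objective: simpler
-- what changed: Replaces the nested index loop (inner while pushing characters one by one) plus the final [::-1] reversal with a single forward pass over enumerate that prepends the slice digite[:i] to a string accumulator at each '@'.
import Mathlib
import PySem

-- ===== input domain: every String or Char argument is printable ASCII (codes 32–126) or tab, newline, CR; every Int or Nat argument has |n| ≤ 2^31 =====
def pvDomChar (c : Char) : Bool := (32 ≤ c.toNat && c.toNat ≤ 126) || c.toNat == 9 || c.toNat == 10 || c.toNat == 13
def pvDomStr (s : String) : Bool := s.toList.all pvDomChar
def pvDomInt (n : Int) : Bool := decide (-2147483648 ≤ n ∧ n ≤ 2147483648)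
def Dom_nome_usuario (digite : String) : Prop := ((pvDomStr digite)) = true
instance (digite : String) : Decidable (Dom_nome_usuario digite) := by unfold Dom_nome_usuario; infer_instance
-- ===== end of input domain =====

-- B replaces A's nested while-loop + final [::-1] reversal with one forward pass
-- that prepends the prefix slice digite[:i] at each '@' (objective: simpler).

-- ===== PORT A =====
-- inner 'while i > 0: i -= 1; new.append(digite[i])' — the index stays in [0, len), so
-- digite[i] is ported exactly as List.getD (never out of range here).
def nomeInnerA (l : List Char) : Nat → List Char → List Char
  | 0, new => new
  | i + 1, new => nomeInnerA l i (new ++ [l.getD i ' '])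

-- range(len(digite)) ported as List.range (all indices are nonnegative), digite[i] as getD
-- (i < len always, so this is exact); new[::-1] via PySem slice?.
def nome_usuario (digite : String) : String :=
  let l := digite.toList
  let new := (List.range l.length).foldl
    (fun new i => if ('@' : Char) = l.getD i ' ' then nomeInnerA l i new else new) []
  String.ofList ((PySem.List.slice? new none none (-1)).getD [])

-- ===== PORT B =====
def nome_usuario_alt (digite : String) : String :=
  (PySem.List.enumerate digite.toList 0).foldl
    (fun result p =>
      if p.2 = '@' then
        String.ofList (PySem.List.slice digite.toList none (some p.1)) ++ result
      else result) ""

-- ===== PRECONDITION & SPEC =====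
def Spec_nome_usuario (digite : String) (out : String) : Prop := out = nome_usuario_alt digite
instance (digite : String) (out : String) : Decidable (Spec_nome_usuario digite out) := by unfold Spec_nome_usuario; infer_instance

-- ===== CLAIM (what is proved, stated in full; the proofs are below) =====
def Claim_equal_nome_usuario : Prop := ∀ (digite : String), Dom_nome_usuario digite → Spec_nome_usuario digite (nome_usuario digite)

-- ===== LEMMAS AND PROOFS =====

lemma nomeInnerA_eq (l : List Char) :
    ∀ (i : Nat), i ≤ l.length → ∀ (new : List Char),
      nomeInnerA l i new = new ++ (l.take i).reverse := by
  intro i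
  induction i with
  | zero => intro _ new; simp [nomeInnerA]
  | succ i ih =>
    intro h new
    have hi : i < l.length := by omega
    have : l.getD i ' ' = l[i] := by
      simp [List.getD, List.getElem?_eq_getElem hi]
    have ht : List.take (i + 1) l = List.take i l ++ [l[i]] := by
      rw [List.take_add_one, List.getElem?_eq_getElem hi]; rfl
    rw [nomeInnerA, ih (by omega), this, ht, List.reverse_append,
        List.reverse_singleton, List.append_assoc]

lemma fold_rel (l : List Char) :
    ∀ (n : Nat), n ≤ l.length →
      ((List.range n).foldl
        (fun (result : String) (k : Nat) =>
          if l.getD k ' ' = '@' then String.ofList (l.take k) ++ result else result)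
        "").toList
      =
      ((List.range n).foldl
        (fun new i => if ('@' : Char) = l.getD i ' ' then nomeInnerA l i new else new)
        []).reverse := by
  intro n
  induction n with
  | zero => intro _; simp
  | succ n ih =>
    intro h
    rw [List.range_succ, List.foldl_append, List.foldl_append]
    simp only [List.foldl_cons, List.foldl_nil]
    by_cases hc : l.getD n ' ' = '@'
    · rw [if_pos hc, if_pos hc.symm, nomeInnerA_eq l n (by omega),
          List.reverse_append, List.reverse_reverse, String.toList_append,
          String.toList_ofList, ih (by omega)]
    · rw [if_neg hc, if_neg (fun hh => hc hh.symm)]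
      exact ih (by omega)

-- ===== VERDICT (by name: the statement is the Claim_ definition above) =====
theorem nome_usuario_spec : Claim_equal_nome_usuario := by
  intro digite _
  unfold Spec_nome_usuario nome_usuario nome_usuario_alt
  set l := digite.toList with hl
  -- rewrite B's enumerate fold as a fold over List.range
  rw [PySem.List.enumerate_eq_map_pyRange l ' ', List.foldl_map,
      PySem.List.pyRange_one, List.foldl_map]
  simp only [PySem.List.len, Int.sub_zero, Int.toNat_natCast, zero_add,
    PySem.List.pyGetD_natCast, PySem.List.slice_to_natCast,
    PySem.List.slice?_none_none_neg_one, Option.getD_some]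
  apply String.toList_injective
  rw [String.toList_ofList]
  exact (fold_rel l l.length (le_refl _)).symm
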